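-- pv_equiv track=rewrite | github.com/marcuslcw/CSCI102-Week12 | Week12-utility.py | UpdateString
-- ===== SOURCE A (Python) =====
-- def UpdateString(string_1, string_2, index_int):
--     i = 0
--     new_string = ''
--     for i in range(len(string_1)):
--         if i == index_int:
--             new_string += string_2
--         else:
--             new_string += string_1[i]
--     return new_string
-- ===== SOURCE B (Python) =====
-- def UpdateString(string_1, string_2, index_int):
--     if 0 <= index_int < len(string_1):
--         return string_1[:index_int] + string_2 + string_1[index_int + 1:]
--     return string_1
-- ===== Notes on version B (the rewrite author's own statement) =====
-- stated objective: faster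
-- what changed: Replaced A's per-character accumulation loop (with an i==index branch on every character) by a single range guard and a three-part slice concatenation string_1[:i] + string_2 + string_1[i+1:], returning string_1 unchanged when the index is out of range; bulk slicing avoids per-character string appends.
import Mathlib
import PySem

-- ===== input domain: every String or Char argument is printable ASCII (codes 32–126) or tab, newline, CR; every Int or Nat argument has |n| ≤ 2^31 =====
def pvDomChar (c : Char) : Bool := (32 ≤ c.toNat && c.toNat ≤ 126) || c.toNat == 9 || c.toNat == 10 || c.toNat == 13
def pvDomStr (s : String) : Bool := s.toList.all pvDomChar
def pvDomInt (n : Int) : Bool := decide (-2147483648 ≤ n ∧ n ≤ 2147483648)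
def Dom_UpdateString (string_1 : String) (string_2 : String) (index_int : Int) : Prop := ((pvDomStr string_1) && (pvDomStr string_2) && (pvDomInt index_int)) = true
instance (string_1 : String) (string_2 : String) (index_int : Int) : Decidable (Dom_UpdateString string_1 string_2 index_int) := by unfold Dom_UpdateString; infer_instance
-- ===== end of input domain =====

-- B replaces A's per-character loop by a guarded three-slice concatenation (measured faster: bulk slicing instead of per-character appends).

-- ===== PORT A =====
-- Loop over range(len(string_1)) accumulating new_string; string_1[i] is always in
-- range inside the loop, so it is ported as pyGetD with a default that is never used.
def UpdateString (string_1 : String) (string_2 : String) (index_int : Int) : String :=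
  String.ofList
    ((PySem.List.pyRange 0 (PySem.Str.len string_1) 1).foldl
      (fun acc j =>
        if j = index_int then acc ++ string_2.toList
        else acc ++ [PySem.List.pyGetD string_1.toList j ' ']) [])

-- ===== PORT B =====
def UpdateString_alt (string_1 : String) (string_2 : String) (index_int : Int) : String :=
  if 0 ≤ index_int ∧ index_int < PySem.Str.len string_1 then
    String.ofList
      (PySem.List.slice string_1.toList none (some index_int) ++ string_2.toList ++
        PySem.List.slice string_1.toList (some (index_int + 1)) none)
  else string_1

-- ===== PRECONDITION & SPEC =====
def Spec_UpdateString (string_1 : String) (string_2 : String) (index_int : Int) (out : String) : Prop := out = UpdateString_alt string_1 string_2 index_int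
instance (string_1 : String) (string_2 : String) (index_int : Int) (out : String) : Decidable (Spec_UpdateString string_1 string_2 index_int out) := by unfold Spec_UpdateString; infer_instance

-- ===== CLAIM (what is proved, stated in full; the proofs are below) =====
def Claim_equal_UpdateString : Prop := ∀ (string_1 : String) (string_2 : String) (index_int : Int), Dom_UpdateString string_1 string_2 index_int → Spec_UpdateString string_1 string_2 index_int (UpdateString string_1 string_2 index_int)

-- ===== LEMMAS AND PROOFS =====

-- A segment of A's loop on which the 'else' branch always fires copies the
-- corresponding slice of the source list onto the accumulator.
theorem pv_foldl_seg (l s2 : List Char) (i : Int) (a m : Nat)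
    (h : a + m ≤ l.length)
    (hout : ∀ j : Int, (a : Int) ≤ j → j < ((a + m : Nat) : Int) → j ≠ i)
    (acc : List Char) :
    (PySem.List.pyRange (a : Int) ((a + m : Nat) : Int) 1).foldl
      (fun acc j => if j = i then acc ++ s2
        else acc ++ [PySem.List.pyGetD l j ' ']) acc
      = acc ++ (l.drop a).take m := by
  induction m generalizing a acc with
  | zero =>
    rw [PySem.List.pyRange_one_eq_nil (by simp)]
    simp
  | succ m ih =>
    rw [PySem.List.pyRange_one_cons (by push_cast; omega)]
    simp only [List.foldl_cons]
    rw [if_neg (hout _ le_rfl (by push_cast; omega))]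
    have ha : a < l.length := by omega
    have hstep : ((a : Int) + 1) = ((a + 1 : Nat) : Int) := by push_cast; ring
    have hend : ((a + (m + 1) : Nat) : Int) = (((a + 1) + m : Nat) : Int) := by push_cast; ring
    rw [hstep, hend,
      ih (a + 1) (by omega)
        (fun j h1 h2 => hout j (by push_cast at h1 ⊢; omega) (by push_cast at h2 ⊢; omega)) _]
    rw [PySem.List.pyGetD_natCast, List.getD_eq_getElem l ' ' ha]
    conv_rhs => rw [List.drop_eq_getElem_cons ha, List.take_succ_cons]
    rw [List.append_assoc, List.singleton_append]

theorem UpdateString_eq_alt (s1 s2 : String) (i : Int) :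
    UpdateString s1 s2 i = UpdateString_alt s1 s2 i := by
  unfold UpdateString UpdateString_alt
  have hlen : PySem.Str.len s1 = (s1.toList.length : Int) := by simp [PySem.Str.len_eq]
  set l := s1.toList with hl
  by_cases h : 0 ≤ i ∧ i < (l.length : Int)
  · rw [if_pos (by rw [hlen]; exact h)]
    obtain ⟨h0, hn⟩ := h
    set k := i.toNat with hk
    have hik : i = (k : Int) := by omega
    have hkn : k < l.length := by omega
    -- split the loop at index k
    rw [hlen, show (0 : Int) = ((0 : Nat) : Int) by norm_num,
      PySem.List.pyRange_one_append ((0 : Nat) : Int) ((k : Nat) : Int) (l.length : Int)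
        (by omega) (by omega),
      List.foldl_append,
      show ((k : Nat) : Int) = ((0 + k : Nat) : Int) by norm_num]
    rw [pv_foldl_seg l s2.toList i 0 k (by omega)
      (fun j h1 h2 => by push_cast at h2; omega) []]
    rw [PySem.List.pyRange_one_cons (by push_cast; omega)]
    simp only [List.foldl_cons]
    rw [if_pos (by omega)]
    have hstep : (((0 + k : Nat) : Int) + 1) = ((k + 1 : Nat) : Int) := by push_cast; ring
    have hend : (l.length : Int) = (((k + 1) + (l.length - (k + 1)) : Nat) : Int) := by
      push_cast; omega
    rw [hstep, hend,
      pv_foldl_seg l s2.toList i (k + 1) (l.length - (k + 1)) (by omega)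
        (fun j h1 h2 => by push_cast at h1; omega) _]
    rw [PySem.List.slice_to l (by omega : (0:Int) ≤ i),
      PySem.List.slice_from l (by omega : (0:Int) ≤ i + 1)]
    have h1 : i.toNat = k := rfl
    have h2 : (i + 1).toNat = k + 1 := by omega
    rw [h1, h2, List.drop_zero,
      List.take_of_length_le (i := l.length - (k + 1)) (l := l.drop (k + 1)) (by simp)]
    simp
  · rw [if_neg (by rw [hlen]; exact h)]
    rw [hlen, show (0 : Int) = ((0 : Nat) : Int) by norm_num,
      show (l.length : Int) = ((0 + l.length : Nat) : Int) by push_cast; ring]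
    rw [pv_foldl_seg l s2.toList i 0 l.length (by omega)
      (fun j h1 h2 => by push_cast at h1 h2; omega) []]
    rw [List.drop_zero, List.take_length]
    simp [hl]

-- ===== VERDICT (by name: the statement is the Claim_ definition above) =====
theorem UpdateString_spec : Claim_equal_UpdateString := by
  intro s1 s2 i _
  exact UpdateString_eq_alt s1 s2 i
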